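-- pv_equiv track=rewrite | github.com/kaluginpeter/Algorithms_and_structures_tasks | CodeWars/6kyu/The_most_common_letter.py | replace_common
-- ===== SOURCE A (Python) =====
-- from collections import defaultdict
--
-- def replace_common(st, letter):
--     bound: int = -1
--     target: str = ''
--     seen: dict[str, int] = defaultdict(int)
--     first: dict[str, int] = dict()
--     for i in range(len(st)):
--         char = st[i]
--         if char not in first: first[char] = i
--         if char == ' ': continue
--         seen[char] += 1
--         if seen[char] > bound:
--             bound = seen[char]
--             target = char
--         elif seen[char] == bound and first[char] < first[target]:
--             bound = seen[char]
--             target = char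
--     return st.replace(target, letter)
-- ===== SOURCE B (Python) =====
-- from collections import Counter
--
-- def replace_common(st, letter):
--     counts = Counter(c for c in st if c != ' ')
--     target = ''
--     if counts:
--         m = max(counts.values())
--         for c in st:
--             if c != ' ' and counts[c] == m:
--                 target = c
--                 break
--     return st.replace(target, letter)
-- ===== Notes on version B (the rewrite author's own statement) =====
-- stated objective: simpler
-- what changed: A maintains a running argmax in one pass with a seen-counter dict, a first-index dict and a tie-break update rule; B decomposes the task into two plain passes: build the full frequency table (Counter), take its maximum, then pick the first non-space character attaining it.
import Mathlib
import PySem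

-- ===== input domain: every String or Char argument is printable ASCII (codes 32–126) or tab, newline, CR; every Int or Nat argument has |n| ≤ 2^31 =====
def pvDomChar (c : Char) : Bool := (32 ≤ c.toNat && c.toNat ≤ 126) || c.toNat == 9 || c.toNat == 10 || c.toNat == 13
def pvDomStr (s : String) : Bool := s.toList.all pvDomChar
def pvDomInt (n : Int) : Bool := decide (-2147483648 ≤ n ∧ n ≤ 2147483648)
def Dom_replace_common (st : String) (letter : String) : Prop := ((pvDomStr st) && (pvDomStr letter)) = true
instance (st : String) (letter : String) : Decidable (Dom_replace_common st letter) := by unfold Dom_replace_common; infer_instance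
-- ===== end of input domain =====

-- B replaces A's single-pass running argmax (with two auxiliary dicts) by a two-pass
-- decomposition: build the full frequency table once, take its maximum, then pick the
-- first non-space character attaining it; objective: simpler. Same return value everywhere.

-- ===== PORT A =====
-- loop body of A's 'for i in range(len(st))'; state = (bound, target, seen, first);
-- target is '' or a 1-char string, modelled as a List Char of length ≤ 1
def pvStepA (s : Int × List Char × PySem.Dict Char Int × PySem.Dict Char Int)
    (p : Int × Char) : Int × List Char × PySem.Dict Char Int × PySem.Dict Char Int :=
  let bound := s.1
  let target := s.2.1
  let seen := s.2.2.1
  let first := s.2.2.2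
  let char := p.2
  let first := if first.contains char then first else first.insert char p.1
  if char = ' ' then (bound, target, seen, first)
  else
    let seen := seen.modify char 0 (· + 1)
    if seen.getD char 0 > bound then (seen.getD char 0, [char], seen, first)
    else if seen.getD char 0 = bound ∧ first.getD char 0 < first.getD (target.headD ' ') 0 then
      (seen.getD char 0, [char], seen, first)
    else (bound, target, seen, first)

def replace_common (st : String) (letter : String) : String :=
  let fin := (PySem.List.enumerate st.toList 0).foldl pvStepA
    (-1, [], PySem.Dict.empty, PySem.Dict.empty)
  String.ofList (PySem.Chars.replace st.toList fin.2.1 letter.toList)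

-- ===== PORT B =====
def replace_common_alt (st : String) (letter : String) : String :=
  let cs := st.toList
  let counts := PySem.Dict.counter (cs.filter (fun c => c != ' '))
  let target : List Char :=
    match PySem.List.max? counts.values (fun v => v) with
    | none => []          -- 'if counts:' false: counter empty, target stays ''
    | some m =>
      match cs.find? (fun c => c != ' ' && counts.getD c 0 == m) with
      | some c => [c]
      | none => []
  String.ofList (PySem.Chars.replace cs target letter.toList)

-- ===== PRECONDITION & SPEC =====
def Spec_replace_common (st : String) (letter : String) (out : String) : Prop := out = replace_common_alt st letter
instance (st : String) (letter : String) (out : String) : Decidable (Spec_replace_common st letter out) := by unfold Spec_replace_common; infer_instance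

-- ===== CLAIM (what is proved, stated in full; the proofs are below) =====
def Claim_equal_replace_common : Prop := ∀ (st : String) (letter : String), Dom_replace_common st letter → Spec_replace_common st letter (replace_common st letter)

-- ===== LEMMAS AND PROOFS =====

-- loop invariant for A's fold over the prefix `pre` of the character list:
-- seen is the frequency table of the non-space characters of pre, first maps each char of
-- pre to its first index, and (bound, target) is the running maximum with its argmax:
-- bound is the largest count, target the max-count char with the earliest first occurrence.
def pvInv (pre : List Char) (s : Int × List Char × PySem.Dict Char Int × PySem.Dict Char Int) : Prop :=
  s.2.2.1 = PySem.Dict.counter (pre.filter (fun c => c != ' '))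
  ∧ (∀ c : Char, s.2.2.2.contains c = decide (c ∈ pre))
  ∧ (∀ c ∈ pre, s.2.2.2.getD c 0 = (pre.idxOf c : Int))
  ∧ (pre.filter (fun c => c != ' ') = [] → s.1 = -1 ∧ s.2.1 = [])
  ∧ (pre.filter (fun c => c != ' ') ≠ [] → ∃ tc, s.2.1 = [tc]
       ∧ tc ∈ pre.filter (fun c => c != ' ')
       ∧ s.1 = (pre.count tc : Int)
       ∧ (∀ c ∈ pre.filter (fun c => c != ' '), (pre.count c : Int) ≤ s.1)
       ∧ (∀ c ∈ pre.filter (fun c => c != ' '), (pre.count c : Int) = s.1 →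
            pre.idxOf tc ≤ pre.idxOf c))

lemma pvInv_step (pre : List Char) (x : Char)
    (s : Int × List Char × PySem.Dict Char Int × PySem.Dict Char Int)
    (h : pvInv pre s) : pvInv (pre ++ [x]) (pvStepA s ((pre.length : Int), x)) := by
  obtain ⟨bound, target, seen, first⟩ := s
  unfold pvInv at h ⊢
  obtain ⟨hseen, hcont, hgetD, hnil, hne⟩ := h
  dsimp only at hseen hcont hgetD hnil hne
  have hcntapp : ∀ c : Char, (pre ++ [x]).count c = pre.count c + if x = c then 1 else 0 := by
    intro c
    by_cases hc : x = c <;> simp [List.count_append, hc]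
  have hidx : ∀ c ∈ pre, (pre ++ [x]).idxOf c = pre.idxOf c := by
    intro c hc
    rw [List.idxOf_append, if_pos hc]
  have hidxx : x ∉ pre → (pre ++ [x]).idxOf x = pre.length := by
    intro hxp
    rw [List.idxOf_append, if_neg hxp]
    simp
  have hcont' : ∀ c : Char,
      (if first.contains x then first else first.insert x ((pre.length : Int))).contains c
        = decide (c ∈ pre ++ [x]) := by
    intro c
    by_cases hxp : x ∈ pre
    · rw [if_pos (by rw [hcont]; simp [hxp]), hcont]
      by_cases hc : c = x <;> simp [hc, hxp]
    · rw [if_neg (by rw [hcont]; simp [hxp]), PySem.Dict.contains_insert, hcont]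
      by_cases hc : c = x <;> simp [hc]
  have hgetD' : ∀ c ∈ pre ++ [x],
      (if first.contains x then first else first.insert x ((pre.length : Int))).getD c 0
        = (((pre ++ [x]).idxOf c : Nat) : Int) := by
    intro c hc
    by_cases hcp : c ∈ pre
    · rw [hidx c hcp]
      by_cases hxp : x ∈ pre
      · rw [if_pos (by rw [hcont]; simp [hxp])]
        exact hgetD c hcp
      · have hcx : c ≠ x := fun e => hxp (e ▸ hcp)
        rw [if_neg (by rw [hcont]; simp [hxp]), PySem.Dict.getD_insert_of_ne _ _ _ hcx]
        exact hgetD c hcp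
    · have hcx : c = x := by
        rcases List.mem_append.mp hc with h1 | h1
        · exact absurd h1 hcp
        · simpa using h1
      subst hcx
      rw [if_neg (by rw [hcont]; simp [hcp]), PySem.Dict.getD_insert_self, hidxx hcp]
  by_cases hx : x = ' '
  · subst hx
    simp only [pvStepA]
    try dsimp only
    simp only [if_true]
    have hfilt : (pre ++ [' ']).filter (fun c => c != ' ') = pre.filter (fun c => c != ' ') := by
      simp [List.filter_append]
    refine ⟨?_, hcont', hgetD', ?_, ?_⟩
    · rw [hfilt]; exact hseen
    · intro hf; rw [hfilt] at hf; exact hnil hf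
    · intro hf
      rw [hfilt] at hf
      obtain ⟨tc, htgt, htcmem, hbound, hub, hmin⟩ := hne hf
      have htcsp : tc ≠ ' ' := by simpa using (List.mem_filter.mp htcmem).2
      have htcpre : tc ∈ pre := (List.mem_filter.mp htcmem).1
      refine ⟨tc, htgt, ?_, ?_, ?_, ?_⟩
      · rw [hfilt]; exact htcmem
      · rw [hcntapp tc, if_neg (fun e => htcsp e.symm)]
        simpa using hbound
      · intro c hc
        rw [hfilt] at hc
        have hcsp : c ≠ ' ' := by simpa using (List.mem_filter.mp hc).2
        rw [hcntapp c, if_neg (fun e => hcsp e.symm)]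
        simpa using hub c hc
      · intro c hc hcnt
        rw [hfilt] at hc
        have hcsp : c ≠ ' ' := by simpa using (List.mem_filter.mp hc).2
        have hcpre : c ∈ pre := (List.mem_filter.mp hc).1
        rw [hidx tc htcpre, hidx c hcpre]
        apply hmin c hc
        rw [hcntapp c, if_neg (fun e => hcsp e.symm)] at hcnt
        simpa using hcnt
  · have hfilt : (pre ++ [x]).filter (fun c => c != ' ') = pre.filter (fun c => c != ' ') ++ [x] := by
      simp [List.filter_append, hx]
    have hxns : (pre.filter (fun c => c != ' ')).count x = pre.count x :=
      List.count_filter (by simpa using hx)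
    have hseen' : seen.modify x 0 (· + 1)
        = PySem.Dict.counter ((pre ++ [x]).filter (fun c => c != ' ')) := by
      rw [hfilt, PySem.Dict.counter_append_singleton, hseen]
    have hnewc : (seen.modify x 0 (· + 1)).getD x 0 = (pre.count x : Int) + 1 := by
      rw [hseen, PySem.Dict.getD_modify_self, PySem.Dict.getD_counter, hxns]
    simp only [pvStepA]
    try dsimp only
    rw [if_neg hx, hnewc]
    by_cases hns : pre.filter (fun c => c != ' ') = []
    · obtain ⟨hb, ht⟩ := hnil hns
      subst hb; subst ht
      have hx0 : pre.count x = 0 := by rw [← hxns, hns]; rfl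
      rw [if_pos (show ((pre.count x : Int) + 1 > (-1 : Int)) by omega)]
      try dsimp only
      refine ⟨hseen', hcont', hgetD', ?_, ?_⟩
      · intro hf; rw [hfilt] at hf; simp at hf
      · intro _
        refine ⟨x, rfl, ?_, ?_, ?_, ?_⟩
        · rw [hfilt]; simp
        · rw [hcntapp x, if_pos rfl]; push_cast; ring
        · intro c hc
          rw [hfilt, hns] at hc
          have hcx : c = x := by simpa using hc
          subst hcx
          rw [hcntapp c, if_pos rfl]; push_cast; omega
        · intro c hc _
          rw [hfilt, hns] at hc
          have hcx : c = x := by simpa using hc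
          subst hcx
          exact le_refl _
    · obtain ⟨tc, htgt, htcmem, hbound, hub, hmin⟩ := hne hns
      subst htgt
      have htcpre : tc ∈ pre := (List.mem_filter.mp htcmem).1
      have htcsp : tc ≠ ' ' := by simpa using (List.mem_filter.mp htcmem).2
      have hgtc : (if first.contains x then first else first.insert x ((pre.length : Int))).getD tc 0
          = (pre.idxOf tc : Int) := by
        rw [hgetD' tc (by simp [htcpre]), hidx tc htcpre]
      have hgx : (if first.contains x then first else first.insert x ((pre.length : Int))).getD x 0
          = ((pre ++ [x]).idxOf x : Int) := hgetD' x (by simp)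
      simp only [List.headD_cons]
      simp only [hgx, hgtc]
      by_cases h1 : ((pre.count x : Int) + 1 > bound)
      · rw [if_pos h1]
        try dsimp only
        refine ⟨hseen', hcont', hgetD', ?_, ?_⟩
        · intro hf; rw [hfilt] at hf; simp at hf
        · intro _
          refine ⟨x, rfl, ?_, ?_, ?_, ?_⟩
          · rw [hfilt]; simp
          · rw [hcntapp x, if_pos rfl]; push_cast; ring
          · intro c hc
            rw [hfilt] at hc
            by_cases hcx : c = x
            · subst hcx; rw [hcntapp c, if_pos rfl]; push_cast; omega
            · have hc1 : c ∈ pre.filter (fun c => c != ' ') := by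
                rcases List.mem_append.mp hc with h' | h'
                · exact h'
                · exact absurd (by simpa using h') hcx
              rw [hcntapp c, if_neg (fun e => hcx e.symm)]
              have := hub c hc1
              push_cast
              omega
          · intro c hc hcnt
            by_cases hcx : c = x
            · subst hcx; exact le_refl _
            · exfalso
              rw [hfilt] at hc
              have hc1 : c ∈ pre.filter (fun c => c != ' ') := by
                rcases List.mem_append.mp hc with h' | h'
                · exact h'
                · exact absurd (by simpa using h') hcx
              have := hub c hc1
              rw [hcntapp c, if_neg (fun e => hcx e.symm)] at hcnt
              push_cast at hcnt
              omega
      · rw [if_neg h1]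
        by_cases h2 : ((pre.count x : Int) + 1 = bound ∧ (((pre ++ [x]).idxOf x : Nat) : Int) < ((pre.idxOf tc : Nat) : Int))
        · rw [if_pos h2]
          obtain ⟨h2a, h2b⟩ := h2
          try dsimp only
          refine ⟨hseen', hcont', hgetD', ?_, ?_⟩
          · intro hf; rw [hfilt] at hf; simp at hf
          · intro _
            refine ⟨x, rfl, ?_, ?_, ?_, ?_⟩
            · rw [hfilt]; simp
            · rw [hcntapp x, if_pos rfl]; push_cast; ring
            · intro c hc
              rw [hfilt] at hc
              by_cases hcx : c = x
              · subst hcx; rw [hcntapp c, if_pos rfl]; push_cast; omega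
              · have hc1 : c ∈ pre.filter (fun c => c != ' ') := by
                  rcases List.mem_append.mp hc with h' | h'
                  · exact h'
                  · exact absurd (by simpa using h') hcx
                rw [hcntapp c, if_neg (fun e => hcx e.symm)]
                have := hub c hc1
                push_cast
                omega
            · intro c hc hcnt
              by_cases hcx : c = x
              · subst hcx; exact le_refl _
              · rw [hfilt] at hc
                have hc1 : c ∈ pre.filter (fun c => c != ' ') := by
                  rcases List.mem_append.mp hc with h' | h'
                  · exact h'
                  · exact absurd (by simpa using h') hcx
                have hcpre : c ∈ pre := (List.mem_filter.mp hc1).1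
                rw [hcntapp c, if_neg (fun e => hcx e.symm)] at hcnt
                push_cast at hcnt
                have hmc := hmin c hc1 (by omega)
                rw [hidx c hcpre]
                omega
        · rw [if_neg h2]
          try dsimp only
          have htcx : tc ≠ x := by
            intro e
            apply h1
            have hb' := hbound
            rw [e] at hb'
            omega
          refine ⟨hseen', hcont', hgetD', ?_, ?_⟩
          · intro hf; rw [hfilt] at hf; simp at hf
          · intro _
            refine ⟨tc, rfl, ?_, ?_, ?_, ?_⟩
            · rw [hfilt]; exact List.mem_append_left _ htcmem
            · rw [hcntapp tc, if_neg (fun e => htcx e.symm)]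
              simpa using hbound
            · intro c hc
              rw [hfilt] at hc
              by_cases hcx : c = x
              · subst hcx; rw [hcntapp c, if_pos rfl]; push_cast; omega
              · have hc1 : c ∈ pre.filter (fun c => c != ' ') := by
                  rcases List.mem_append.mp hc with h' | h'
                  · exact h'
                  · exact absurd (by simpa using h') hcx
                rw [hcntapp c, if_neg (fun e => hcx e.symm)]
                have := hub c hc1
                push_cast
                omega
            · intro c hc hcnt
              by_cases hcx : c = x
              · subst hcx
                rw [hcntapp c, if_pos rfl] at hcnt
                push_cast at hcnt
                have hnb : ¬ ((((pre ++ [c]).idxOf c : Nat) : Int) < ((pre.idxOf tc : Nat) : Int)) :=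
                  fun hb => h2 ⟨by omega, hb⟩
                rw [hidx tc htcpre]
                omega
              · rw [hfilt] at hc
                have hc1 : c ∈ pre.filter (fun c => c != ' ') := by
                  rcases List.mem_append.mp hc with h' | h'
                  · exact h'
                  · exact absurd (by simpa using h') hcx
                have hcpre : c ∈ pre := (List.mem_filter.mp hc1).1
                rw [hcntapp c, if_neg (fun e => hcx e.symm)] at hcnt
                push_cast at hcnt
                rw [hidx tc htcpre, hidx c hcpre]
                exact hmin c hc1 (by omega)

lemma pvInv_fold (cs : List Char) :
    pvInv cs ((PySem.List.enumerate cs 0).foldl pvStepA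
      (-1, [], PySem.Dict.empty, PySem.Dict.empty)) := by
  induction cs using List.reverseRecOn with
  | nil =>
    refine ⟨rfl, ?_, ?_, fun _ => ⟨rfl, rfl⟩, fun hne => absurd rfl hne⟩ <;> simp
  | append_singleton l x ih =>
    rw [PySem.List.enumerate_append, List.foldl_append]
    have : PySem.List.enumerate [x] (0 + (l.length : Int)) = [((l.length : Int), x)] := by
      simp [PySem.List.enumerate]
    rw [this, List.foldl_cons, List.foldl_nil]
    exact pvInv_step l x _ ih

-- a first occurrence is no later than any occurrence
lemma pv_idxOf_le (cs : List Char) (j : Nat) (hj : j < cs.length) : cs.idxOf cs[j] ≤ j := by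
  induction cs generalizing j with
  | nil => simp at hj
  | cons a l ih =>
    cases j with
    | zero => simp
    | succ j =>
      have hjl : j < l.length := by simpa using hj
      by_cases h : a = l[j]
      · simp [h]
      · have he : (a :: l)[j+1] = l[j] := rfl
        rw [he, List.idxOf_cons]
        have hb : (a == l[j]) = false := by simp [h]
        rw [hb]
        simpa using Nat.succ_le_succ (ih j hjl)

-- A's final target equals B's target
lemma pv_target_eq (cs : List Char) :
    ((PySem.List.enumerate cs 0).foldl pvStepA
      (-1, [], PySem.Dict.empty, PySem.Dict.empty)).2.1
    = (match PySem.List.max? (PySem.Dict.counter (cs.filter (fun c => c != ' '))).values (fun v => v) with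
       | none => ([] : List Char)
       | some m =>
         match cs.find? (fun c => c != ' ' && (PySem.Dict.counter (cs.filter (fun c => c != ' '))).getD c 0 == m) with
         | some c => [c]
         | none => []) := by
  obtain ⟨hseen, hcont, hgetD, hnil, hne⟩ := pvInv_fold cs
  set fin := (PySem.List.enumerate cs 0).foldl pvStepA
      (-1, [], PySem.Dict.empty, PySem.Dict.empty) with hfin
  set ns := cs.filter (fun c => c != ' ') with hns
  by_cases h0 : ns = []
  · have hmax : PySem.List.max? (PySem.Dict.counter ns).values (fun v => v) = none := by
      rw [h0]; decide
    rw [hmax]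
    exact (hnil h0).2
  · obtain ⟨tc, htgt, htcmem, hbound, hub, hmin⟩ := hne h0
    have htcpre : tc ∈ cs := (List.mem_filter.mp htcmem).1
    have htcsp : tc ≠ ' ' := by simpa using (List.mem_filter.mp htcmem).2
    have hvals : (PySem.Dict.counter ns).values
        = (PySem.Set.ofList ns).map (fun k => ((ns.count k : Int))) := by
      simp only [PySem.Dict.values, PySem.Dict.items_counter, List.map_map]
      rfl
    have hcnteq : ∀ c : Char, c ≠ ' ' → ns.count c = cs.count c := by
      intro c hc
      exact List.count_filter (by simpa using hc)
    obtain ⟨a, ha⟩ := List.exists_mem_of_ne_nil ns h0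
    have hvne : (PySem.Dict.counter ns).values ≠ [] := by
      rw [hvals]
      intro hemp
      rw [List.map_eq_nil_iff] at hemp
      exact absurd ((PySem.Set.mem_ofList ns a).mpr ha) (by rw [hemp]; simp)
    obtain ⟨m, hm⟩ : ∃ m, PySem.List.max? (PySem.Dict.counter ns).values (fun v => v) = some m := by
      cases hc : PySem.List.max? (PySem.Dict.counter ns).values (fun v => v) with
      | none => exact absurd ((PySem.List.max?_eq_none_iff _ _).mp hc) hvne
      | some m => exact ⟨m, rfl⟩
    have hmb : m = fin.1 := by
      have hmmem := PySem.List.max?_mem hm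
      rw [hvals] at hmmem
      obtain ⟨c0, hc0S, hc0⟩ := List.mem_map.mp hmmem
      have hc0ns : c0 ∈ ns := (PySem.Set.mem_ofList _ _).mp hc0S
      have hc0sp : c0 ≠ ' ' := by simpa using (List.mem_filter.mp hc0ns).2
      have h1 : m ≤ fin.1 := by
        rw [← hc0, hcnteq c0 hc0sp]
        exact hub c0 hc0ns
      have h2 : fin.1 ≤ m := by
        have := PySem.List.max?_isMax hm ((ns.count tc : Int))
          (by
            rw [hvals]
            exact List.mem_map.mpr ⟨tc, (PySem.Set.mem_ofList ns tc).mpr htcmem, rfl⟩)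
        rw [hcnteq tc htcsp] at this
        rw [hbound]
        exact this
      omega
    have hfind : cs.find? (fun c => c != ' ' && (PySem.Dict.counter ns).getD c 0 == m) = some tc := by
      rw [List.find?_eq_some_iff_getElem]
      have hidxlt : cs.idxOf tc < cs.length := List.idxOf_lt_length_iff.mpr htcpre
      refine ⟨?_, cs.idxOf tc, hidxlt, List.getElem_idxOf hidxlt, ?_⟩
      · simp only [Bool.and_eq_true, bne_iff_ne, beq_iff_eq, ne_eq]
        refine ⟨htcsp, ?_⟩
        rw [PySem.Dict.getD_counter, hcnteq tc htcsp, hmb, ← hbound]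
      · intro j hj
        by_contra hcj
        simp only [Bool.not_eq_eq_eq_not, Bool.not_true, Bool.not_eq_false,
          Bool.and_eq_true, bne_iff_ne, beq_iff_eq, ne_eq] at hcj
        obtain ⟨hjsp, hjcnt⟩ := hcj
        have hjmem : cs[j] ∈ ns := List.mem_filter.mpr ⟨cs.getElem_mem _, by simpa using hjsp⟩
        rw [PySem.Dict.getD_counter, hcnteq _ hjsp, hmb] at hjcnt
        have := hmin cs[j] hjmem hjcnt
        have hle := pv_idxOf_le cs j (by omega)
        omega
    rw [hm]
    try dsimp only
    rw [hfind]
    exact htgt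

-- ===== VERDICT (by name: the statement is the Claim_ definition above) =====
theorem replace_common_spec : Claim_equal_replace_common := by
  intro st letter _
  unfold Spec_replace_common replace_common replace_common_alt
  simp only []
  rw [pv_target_eq st.toList]
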